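-- pv_equiv track=rewrite | github.com/cyberdudebivash/CYBERDUDEBIVASH-THREAT-INTEL-PLATFORM | agent/analysis/attack_coverage.py | _calculate_gap_severity
-- ===== SOURCE A (Python) =====
-- from typing import List, Dict, Set
--
-- def _calculate_gap_severity(
--     cves: List[Dict],
--     epss_accelerating: bool,
-- ) -> str:
--     """
--     Determine severity of an ATT&CK coverage gap
--     using exploitation likelihood and velocity.
--     """
--
--     severity = "MEDIUM"
--
--     for cve in cves:
--         cve_sev = cve.get("severity")
--
--         if cve_sev == "CRITICAL":
--             return "CRITICAL"
--
--         if cve_sev == "HIGH":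
--             severity = "HIGH"
--
--         # Escalate on EPSS acceleration
--         if cve.get("epss_acceleration") in ("ACCELERATING", "RAPID ACCELERATION"):
--             return "CRITICAL"
--
--     if epss_accelerating:
--         severity = "HIGH"
--
--     return severity
-- ===== SOURCE B (Python) =====
-- from typing import List, Dict
--
-- def _calculate_gap_severity(
--     cves: List[Dict],
--     epss_accelerating: bool,
-- ) -> str:
--     # Separate existence scans instead of one interleaved accumulator loop:
--     # any early return in A yields "CRITICAL" regardless of order, so the
--     # result is a pure classification.
--     if any(c.get("severity") == "CRITICAL"
--            or c.get("epss_acceleration") in ("ACCELERATING", "RAPID ACCELERATION")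
--            for c in cves):
--         return "CRITICAL"
--     if epss_accelerating or any(c.get("severity") == "HIGH" for c in cves):
--         return "HIGH"
--     return "MEDIUM"
-- ===== Notes on version B (the rewrite author's own statement) =====
-- stated objective: simpler
-- what changed: Replaces the single interleaved loop with a mutable severity accumulator and early returns by a pure classification via two independent any() existence scans (CRITICAL-triggering condition first, then HIGH).
import Mathlib
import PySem

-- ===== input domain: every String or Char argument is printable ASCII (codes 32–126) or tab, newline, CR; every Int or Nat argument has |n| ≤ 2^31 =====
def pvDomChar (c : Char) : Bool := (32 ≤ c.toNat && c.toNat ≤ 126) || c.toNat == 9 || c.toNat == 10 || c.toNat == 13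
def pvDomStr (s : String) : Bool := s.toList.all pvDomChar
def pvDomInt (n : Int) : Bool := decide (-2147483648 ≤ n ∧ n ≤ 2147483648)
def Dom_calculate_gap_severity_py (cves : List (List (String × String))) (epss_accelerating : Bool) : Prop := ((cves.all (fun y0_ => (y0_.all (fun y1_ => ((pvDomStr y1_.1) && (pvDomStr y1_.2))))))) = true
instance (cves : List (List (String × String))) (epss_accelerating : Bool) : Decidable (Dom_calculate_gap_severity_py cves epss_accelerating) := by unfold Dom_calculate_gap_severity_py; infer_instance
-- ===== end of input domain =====

-- B replaces A's interleaved accumulator loop with early returns by two independent existence scans (objective: simpler).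


-- ===== PORT A =====
-- cve.get(k) on the association list = first-match lookup (PySem.Dict.get?)
def pvGapLoopA (cves : List (List (String × String))) (epss_accelerating : Bool)
    (severity : String) : String :=
  match cves with
  | [] => if epss_accelerating then "HIGH" else severity
  | cve :: rest =>
    let cve_sev := (PySem.Dict.mk cve).get? "severity"
    if cve_sev = some "CRITICAL" then "CRITICAL"
    else
      let severity' := if cve_sev = some "HIGH" then "HIGH" else severity
      if (PySem.Dict.mk cve).get? "epss_acceleration" = some "ACCELERATING" ∨
         (PySem.Dict.mk cve).get? "epss_acceleration" = some "RAPID ACCELERATION" then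
        "CRITICAL"
      else pvGapLoopA rest epss_accelerating severity'

def calculate_gap_severity_py (cves : List (List (String × String))) (epss_accelerating : Bool) : String :=
  pvGapLoopA cves epss_accelerating "MEDIUM"

-- ===== PORT B =====
def calculate_gap_severity_py_alt (cves : List (List (String × String))) (epss_accelerating : Bool) : String :=
  if cves.any (fun c =>
      (PySem.Dict.mk c).get? "severity" == some "CRITICAL" ||
      (PySem.Dict.mk c).get? "epss_acceleration" == some "ACCELERATING" ||
      (PySem.Dict.mk c).get? "epss_acceleration" == some "RAPID ACCELERATION") then
    "CRITICAL"
  else if epss_accelerating || cves.any (fun c => (PySem.Dict.mk c).get? "severity" == some "HIGH") then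
    "HIGH"
  else
    "MEDIUM"

-- ===== PRECONDITION & SPEC =====
def Spec_calculate_gap_severity_py (cves : List (List (String × String))) (epss_accelerating : Bool) (out : String) : Prop := out = calculate_gap_severity_py_alt cves epss_accelerating
instance (cves : List (List (String × String))) (epss_accelerating : Bool) (out : String) : Decidable (Spec_calculate_gap_severity_py cves epss_accelerating out) := by unfold Spec_calculate_gap_severity_py; infer_instance

-- ===== CLAIM (what is proved, stated in full; the proofs are below) =====
def Claim_equal_calculate_gap_severity_py : Prop := ∀ (cves : List (List (String × String))) (epss_accelerating : Bool), Dom_calculate_gap_severity_py cves epss_accelerating → Spec_calculate_gap_severity_py cves epss_accelerating (calculate_gap_severity_py cves epss_accelerating)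

-- ===== LEMMAS AND PROOFS =====

-- A's loop classified: CRITICAL if any CRITICAL/accelerating cve, else HIGH on the flag or any HIGH cve, else the accumulator.
theorem pvGapLoopA_characterize (cves : List (List (String × String)))
    (epss_accelerating : Bool) (severity : String) :
    pvGapLoopA cves epss_accelerating severity =
      if cves.any (fun c =>
          (PySem.Dict.mk c).get? "severity" == some "CRITICAL" ||
          (PySem.Dict.mk c).get? "epss_acceleration" == some "ACCELERATING" ||
          (PySem.Dict.mk c).get? "epss_acceleration" == some "RAPID ACCELERATION") then
        "CRITICAL"
      else if epss_accelerating || cves.any (fun c => (PySem.Dict.mk c).get? "severity" == some "HIGH") then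
        "HIGH"
      else severity := by
  induction cves generalizing severity with
  | nil => simp [pvGapLoopA]
  | cons c rest ih =>
    simp only [pvGapLoopA, List.any_cons]
    by_cases h1 : (PySem.Dict.mk c).get? "severity" = some "CRITICAL"
    · simp [h1]
    · by_cases h2 : (PySem.Dict.mk c).get? "epss_acceleration" = some "ACCELERATING" ∨
                    (PySem.Dict.mk c).get? "epss_acceleration" = some "RAPID ACCELERATION"
      · rcases h2 with h2 | h2 <;> simp [h1, h2]
      · push_neg at h2
        obtain ⟨h2a, h2b⟩ := h2
        rw [if_neg h1, if_neg (by tauto)]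
        rw [ih]
        by_cases h3 : (PySem.Dict.mk c).get? "severity" = some "HIGH" <;>
          simp [h1, h2a, h2b, h3]

-- ===== VERDICT (by name: the statement is the Claim_ definition above) =====
theorem calculate_gap_severity_py_spec : Claim_equal_calculate_gap_severity_py := by
  intro cves epss _
  unfold Spec_calculate_gap_severity_py calculate_gap_severity_py calculate_gap_severity_py_alt
  rw [pvGapLoopA_characterize]
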